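-- pv_equiv track=rewrite | github.com/ebellocchia/bip_utils | bip_utils/utils/misc/bit.py | Convert
-- ===== SOURCE A (Python) =====
-- from typing import List, Optional, Union
--
-- def Convert(data: Union[bytes, List[int]],
--             from_bits: int,
--             to_bits: int,
--             pad: bool = True) -> Optional[List[int]]:
--     """
--     Perform bit conversion.
--     The function takes the input data (list of integers or byte sequence) and convert every value from
--     the specified number of bits to the specified one.
--     It returns a list of integer where every number is less than 2^to_bits.
--
--     Args:
--         data (list or bytes): Data to be converted
--         from_bits (int)     : Number of bits to start from
--         to_bits (int)       : Number of bits at the end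
--         pad (bool, optional): True if data must be padded with zeros, false otherwise
--
--     Returns:
--         list: List of converted values, None in case of errors
--     """
--     max_out_val = (1 << to_bits) - 1
--     max_acc = (1 << (from_bits + to_bits - 1)) - 1
--
--     acc = 0
--     bits = 0
--     ret = []
--
--     for value in data:
--         # Value shall not be less than zero or greater than 2^from_bits
--         if value < 0 or (value >> from_bits):
--             return None
--         # Continue accumulating until greater than to_bits
--         acc = ((acc << from_bits) | value) & max_acc
--         bits += from_bits
--         while bits >= to_bits:
--             bits -= to_bits
--             ret.append((acc >> bits) & max_out_val)
--     if pad: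
--         if bits:
--             # Pad the value with zeros to reach to_bits
--             ret.append((acc << (to_bits - bits)) & max_out_val)
--     elif bits >= from_bits or ((acc << (to_bits - bits)) & max_out_val):
--         return None
--
--     return ret
-- ===== SOURCE B (Python) =====
-- def Convert(data, from_bits, to_bits, pad=True):
--     """Bit-group conversion via one big accumulator integer and indexed chunk
--     extraction, instead of a bounded sliding-window accumulator."""
--     max_out_val = (1 << to_bits) - 1
--     num = 0
--     for value in data:
--         if value < 0 or (value >> from_bits):
--             return None
--         num = (num << from_bits) | value
--     total_bits = len(data) * from_bits
--     ret = [(num >> (total_bits - (i + 1) * to_bits)) & max_out_val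
--            for i in range(total_bits // to_bits)]
--     rem = total_bits % to_bits
--     if pad:
--         if rem:
--             ret.append((num << (to_bits - rem)) & max_out_val)
--     elif rem >= from_bits or ((num << (to_bits - rem)) & max_out_val):
--         return None
--     return ret
-- ===== Notes on version B (the rewrite author's own statement) =====
-- stated objective: alternative
-- what changed: Replaces the streaming bounded-window accumulator (masked acc, running bit counter, inner while extracting chunks per input value) by a two-phase scheme: fold all values into one unbounded integer, then extract every to_bits-wide chunk by an indexed shift formula and handle the tail via total_bits % to_bits.
-- outside the precondition, e.g. on Convert([], -1, 3, True): A returns [], B returns []; on Convert([-5], -1, 3, True): A returns None, B returns None; on Convert([], 2, 0, True): A returns [], B raises ZeroDivisionError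
import Mathlib
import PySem

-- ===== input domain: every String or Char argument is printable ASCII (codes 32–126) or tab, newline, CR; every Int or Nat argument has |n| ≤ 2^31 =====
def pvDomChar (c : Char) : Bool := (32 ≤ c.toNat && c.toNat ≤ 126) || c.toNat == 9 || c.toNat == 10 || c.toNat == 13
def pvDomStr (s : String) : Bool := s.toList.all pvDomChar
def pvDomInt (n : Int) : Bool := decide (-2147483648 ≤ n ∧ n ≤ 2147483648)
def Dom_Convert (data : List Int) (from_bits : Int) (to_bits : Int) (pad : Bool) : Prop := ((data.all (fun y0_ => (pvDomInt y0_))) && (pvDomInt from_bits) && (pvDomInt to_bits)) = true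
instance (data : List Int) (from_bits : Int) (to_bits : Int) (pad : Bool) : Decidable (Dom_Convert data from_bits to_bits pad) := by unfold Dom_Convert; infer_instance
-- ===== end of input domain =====

-- B replaces A's streaming bounded-window accumulator by a two-phase scheme (fold all values
-- into one big integer, then extract chunks by an indexed shift formula): objective 'alternative'.

-- Python's 'a << n' / 'a >> n' (n an int). Exact for 0 ≤ n, which Pre_Convert guarantees for
-- every shift these ports perform; Python raises ValueError on a negative count.
def pyShl (a n : Int) : Int := a <<< n.toNat
def pyShr (a n : Int) : Int := a >>> n.toNat

-- ===== PORT A =====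
-- the inner 'while bits >= to_bits' loop of A; the fuel argument only guards totality
-- (under Pre_Convert bits drops by to_bits ≥ 1 per pass, so fuel = bits.toNat + 1 is never exhausted)
def convertInner (fuel : Nat) (to_bits max_out acc : Int) (bits : Int) (ret : List Int) : Int × List Int :=
  match fuel with
  | 0 => (bits, ret)
  | f+1 =>
    if to_bits ≤ bits then
      convertInner f to_bits max_out acc (bits - to_bits)
        (ret ++ [PySem.Int.band (pyShr acc (bits - to_bits)) max_out])
    else (bits, ret)

-- A's 'for value in data' loop, carrying (acc, bits, ret); none = early 'return None'
def convertLoop (from_bits to_bits max_acc max_out : Int) :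
    List Int → Int → Int → List Int → Option (Int × Int × List Int)
  | [], acc, bits, ret => some (acc, bits, ret)
  | v :: rest, _acc, bits, ret =>
    if v < 0 ∨ pyShr v from_bits ≠ 0 then none
    else
      let acc' := PySem.Int.band (PySem.Int.bor (pyShl _acc from_bits) v) max_acc
      let s := convertInner ((bits + from_bits).toNat + 1) to_bits max_out acc' (bits + from_bits) ret
      convertLoop from_bits to_bits max_acc max_out rest acc' s.1 s.2

def Convert (data : List Int) (from_bits : Int) (to_bits : Int) (pad : Bool) : Option (List Int) :=
  let max_out := pyShl 1 to_bits - 1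
  let max_acc := pyShl 1 (from_bits + to_bits - 1) - 1
  match convertLoop from_bits to_bits max_acc max_out data 0 0 [] with
  | none => none
  | some (acc, bits, ret) =>
    if pad then
      if bits ≠ 0 then some (ret ++ [PySem.Int.band (pyShl acc (to_bits - bits)) max_out])
      else some ret
    else if from_bits ≤ bits ∨ PySem.Int.band (pyShl acc (to_bits - bits)) max_out ≠ 0 then none
    else some ret

-- ===== PORT B =====
-- B's first loop: validate every value and fold the whole input into one big integer
def altFold (from_bits : Int) : List Int → Int → Option Int
  | [], num => some num
  | v :: rest, num =>
    if v < 0 ∨ pyShr v from_bits ≠ 0 then none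
    else altFold from_bits rest (PySem.Int.bor (pyShl num from_bits) v)

def Convert_alt (data : List Int) (from_bits : Int) (to_bits : Int) (pad : Bool) : Option (List Int) :=
  let max_out := pyShl 1 to_bits - 1
  match altFold from_bits data 0 with
  | none => none
  | some num =>
    let total := (data.length : Int) * from_bits
    let q := PySem.Int.floordiv total to_bits
    let rem := PySem.Int.mod total to_bits
    let ret := (List.range q.toNat).map
      (fun (i : Nat) => PySem.Int.band (pyShr num (total - ((i : Int) + 1) * to_bits)) max_out)
    if pad then
      if rem ≠ 0 then some (ret ++ [PySem.Int.band (pyShl num (to_bits - rem)) max_out])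
      else some ret
    else if from_bits ≤ rem ∨ PySem.Int.band (pyShl num (to_bits - rem)) max_out ≠ 0 then none
    else some ret

-- ===== PRECONDITION & SPEC =====
-- Pre_ restricts to the natural domain from_bits ≥ 0 and to_bits ≥ 1: outside it Python's A
-- raises ValueError on a negative shift count or loops forever (to_bits ≤ 0 with nonempty data),
-- except for degenerate empty/invalid-data inputs where it still returns trivially.
def Pre_Convert (data : List Int) (from_bits : Int) (to_bits : Int) (pad : Bool) : Prop :=
  0 ≤ from_bits ∧ 1 ≤ to_bits
instance (data : List Int) (from_bits : Int) (to_bits : Int) (pad : Bool) : Decidable (Pre_Convert data from_bits to_bits pad) := by unfold Pre_Convert; infer_instance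
def pvWitness_Convert : List Int × Int × Int × Bool := ([3, 1], 5, 8, true)
def Spec_Convert (data : List Int) (from_bits : Int) (to_bits : Int) (pad : Bool) (out : Option (List Int)) : Prop := out = Convert_alt data from_bits to_bits pad
instance (data : List Int) (from_bits : Int) (to_bits : Int) (pad : Bool) (out : Option (List Int)) : Decidable (Spec_Convert data from_bits to_bits pad out) := by unfold Spec_Convert; infer_instance

-- ===== CLAIM (what is proved, stated in full; the proofs are below) =====
def Claim_equal_Convert : Prop := ∀ (data : List Int) (from_bits : Int) (to_bits : Int) (pad : Bool), Dom_Convert data from_bits to_bits pad → Pre_Convert data from_bits to_bits pad → Spec_Convert data from_bits to_bits pad (Convert data from_bits to_bits pad)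

-- ===== LEMMAS AND PROOFS =====

-- Nat-valued model of B's folding loop (the proof's common reference point)
def natNum (F : Nat) : List Int → Nat → Option Nat
  | [], num => some num
  | v :: rest, num =>
    if v < 0 ∨ pyShr v (F : Int) ≠ 0 then none
    else natNum F rest (num * 2 ^ F + v.toNat)

theorem pyShr_natCast (m : Nat) (n : Nat) : pyShr (m : Int) (n : Int) = ((m / 2 ^ n : Nat) : Int) := by
  simp [pyShr, Int.shiftRight_eq_div_pow]

theorem pyShl_natCast (m : Nat) (n : Nat) : pyShl (m : Int) (n : Int) = ((m * 2 ^ n : Nat) : Int) := by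
  simp [pyShl, Int.shiftLeft_eq]

theorem convGuard_false {v : Int} {F : Nat} (h : ¬(v < 0 ∨ pyShr v (F : Int) ≠ 0)) :
    0 ≤ v ∧ v.toNat < 2 ^ F := by
  push_neg at h
  obtain ⟨h0, h1⟩ := h
  have h0' : 0 ≤ v := by omega
  refine ⟨h0', ?_⟩
  have hv : v = ((v.toNat : Nat) : Int) := by omega
  rw [hv, pyShr_natCast] at h1
  have h2 : v.toNat / 2 ^ F = 0 := by exact_mod_cast h1
  have hp : 0 < 2 ^ F := Nat.two_pow_pos F
  rcases Nat.div_eq_zero_iff.mp h2 with h3 | h3 <;> omega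

theorem altFold_eq (F : Nat) : ∀ (data : List Int) (num : Nat),
    altFold (F : Int) data (num : Int) = (natNum F data num).map (fun (n : Nat) => (n : Int)) := by
  intro data
  induction data with
  | nil => intro num; simp [altFold, natNum]
  | cons v rest ih =>
    intro num
    by_cases h : v < 0 ∨ pyShr v (F : Int) ≠ 0
    · simp [altFold, natNum, h]
    · obtain ⟨h0, h1⟩ := convGuard_false h
      have hv : v = ((v.toNat : Nat) : Int) := by omega
      rw [altFold, natNum, if_neg h, if_neg h]
      rw [hv, pyShl_natCast, PySem.Int.bor_natCast, ← ih]
      congr 1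
      simp only [Int.toNat_natCast]
      rw [← Nat.shiftLeft_eq num F, Nat.shiftLeft_add_eq_or_of_lt h1]

-- a % 2^M / 2^s % 2^T only sees bits below M
theorem mod_div_mod (a s T M : Nat) (h : s + T ≤ M) :
    a % 2 ^ M / 2 ^ s % 2 ^ T = a / 2 ^ s % 2 ^ T := by
  have hM : (2:Nat) ^ M = 2 ^ s * 2 ^ (M - s) := by rw [← pow_add]; congr 1; omega
  rw [hM, Nat.mod_mul_right_div_self, Nat.mod_mod_of_dvd _ (pow_dvd_pow 2 (by omega))]

-- the residual padding value does not see bits at or above M either (r ≤ M, r ≤ T)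
theorem residual_eq (a r T M : Nat) (hrM : r ≤ M) (hrT : r ≤ T) :
    a % 2 ^ M * 2 ^ (T - r) % 2 ^ T = a * 2 ^ (T - r) % 2 ^ T := by
  have hT : (2:Nat) ^ T = 2 ^ r * 2 ^ (T - r) := by rw [← pow_add]; congr 1; omega
  rw [hT, Nat.mul_mod_mul_right, Nat.mul_mod_mul_right,
    Nat.mod_mod_of_dvd _ (pow_dvd_pow 2 hrM)]

theorem natNum_decomp (F : Nat) : ∀ (data : List Int) (num num' : Nat),
    natNum F data num = some num' → num' / 2 ^ (data.length * F) = num := by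
  intro data
  induction data with
  | nil => intro num num' h; simp [natNum] at h; simp [h]
  | cons v rest ih =>
    intro num num' h
    rw [natNum] at h
    by_cases hg : v < 0 ∨ pyShr v (F : Int) ≠ 0
    · simp [hg] at h
    · rw [if_neg hg] at h
      obtain ⟨h0, h1⟩ := convGuard_false hg
      have := ih _ _ h
      have hlen : (v :: rest).length * F = rest.length * F + F := by
        simp [List.length_cons]; ring
      rw [hlen, pow_add, ← Nat.div_div_eq_div_mul, this]
      rw [Nat.mul_comm num (2 ^ F), Nat.mul_add_div (Nat.two_pow_pos F), Nat.div_eq_of_lt h1]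
      omega

theorem inner_eq (T : Nat) (hT : 0 < T) (acc : Nat) : ∀ (fuel b : Nat) (ret : List Int),
    b < fuel →
    convertInner fuel (T : Int) ((2 ^ T - 1 : Nat) : Int) (acc : Int) (b : Int) ret
      = (((b % T : Nat) : Int),
         ret ++ (List.range (b / T)).map
           (fun j => ((acc / 2 ^ (b - (j + 1) * T) % 2 ^ T : Nat) : Int))) := by
  intro fuel
  induction fuel with
  | zero => intro b ret h; omega
  | succ f ih =>
    intro b ret h
    rw [convertInner]
    by_cases hb : T ≤ b
    · have hcast : ((b : Int) - (T : Int)) = ((b - T : Nat) : Int) := by omega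
      rw [if_pos (by exact_mod_cast hb), hcast, pyShr_natCast, PySem.Int.band_natCast,
        Nat.and_two_pow_sub_one_eq_mod, ih (b - T) _ (by omega)]
      have hmod : (b - T) % T = b % T := (Nat.mod_eq_sub_mod hb).symm
      have hdiv : b / T = (b - T) / T + 1 := Nat.div_eq_sub_div hT hb
      refine Prod.ext (by rw [hmod]) ?_
      simp only [List.append_assoc]
      congr 1
      rw [hdiv, List.range_succ_eq_map, List.map_cons, List.map_map, List.singleton_append]
      congr 1
      · norm_num
      · refine List.map_congr_left (fun j _ => ?_)
        simp only [Function.comp_apply, Nat.succ_eq_add_one]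
        have e2 : (j + 1 + 1) * T = T + (j + 1) * T := by ring
        have e : b - T - (j + 1) * T = b - (j + 1 + 1) * T := by omega
        rw [e]
    · rw [if_neg (by exact_mod_cast hb)]
      have hb' : b < T := by omega
      rw [Nat.mod_eq_of_lt hb', Nat.div_eq_of_lt hb']
      simp

theorem loopA_eq (F T : Nat) (hT : 0 < T) : ∀ (data : List Int) (num k : Nat) (ret : List Int),
    convertLoop (F : Int) (T : Int) ((2 ^ (F + T - 1) - 1 : Nat) : Int) ((2 ^ T - 1 : Nat) : Int)
      data ((num % 2 ^ (F + T - 1) : Nat) : Int) ((k * F % T : Nat) : Int) ret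
    = (natNum F data num).map (fun num' =>
        (((num' % 2 ^ (F + T - 1) : Nat) : Int), (((k + data.length) * F % T : Nat) : Int),
         ret ++ (List.range' (k * F / T) ((k + data.length) * F / T - k * F / T)).map
           (fun i => ((num' / 2 ^ ((k + data.length) * F - (i + 1) * T) % 2 ^ T : Nat) : Int)))) := by
  intro data
  induction data with
  | nil =>
    intro num k ret
    simp [convertLoop, natNum]
  | cons v rest ih =>
    intro num k ret
    rw [convertLoop, natNum]
    by_cases hg : v < 0 ∨ pyShr v (F : Int) ≠ 0
    · rw [if_pos hg, if_pos hg]; rfl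
    · rw [if_neg hg, if_neg hg]
      obtain ⟨h0, h1⟩ := convGuard_false hg
      have hv : v = ((v.toNat : Nat) : Int) := by omega
      have hacc : PySem.Int.band
            (PySem.Int.bor (pyShl ((num % 2 ^ (F + T - 1) : Nat) : Int) (F : Int)) v)
            ((2 ^ (F + T - 1) - 1 : Nat) : Int)
          = (((num * 2 ^ F + v.toNat) % 2 ^ (F + T - 1) : Nat) : Int) := by
        rw [hv, pyShl_natCast, PySem.Int.bor_natCast, ← Nat.shiftLeft_eq,
          ← Nat.shiftLeft_add_eq_or_of_lt h1, Nat.shiftLeft_eq, PySem.Int.band_natCast,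
          Nat.and_two_pow_sub_one_eq_mod]
        congr 1
        exact ((Nat.mod_modEq num (2 ^ (F + T - 1))).mul_right (2 ^ F)).add_right v.toNat
      have hbits : ((k * F % T : Nat) : Int) + (F : Int) = ((k * F % T + F : Nat) : Int) := by
        push_cast; ring
      rw [hacc, hbits]
      simp only [Int.toNat_natCast]
      rw [inner_eq T hT ((num * 2 ^ F + v.toNat) % 2 ^ (F + T - 1)) (k * F % T + F + 1)
        (k * F % T + F) ret (Nat.lt_succ_self _)]
      dsimp only
      have hkF : (k + 1) * F = k * F + F := by ring
      have hb0m : ((k * F % T + F) % T : Nat) = (k + 1) * F % T := by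
        rw [Nat.mod_add_mod, ← hkF]
      rw [hb0m, ih (num * 2 ^ F + v.toNat) (k + 1)]
      cases hnn : natNum F rest (num * 2 ^ F + v.toNat) with
      | none => simp
      | some num' =>
        simp only [Option.map_some]
        have hlr : (v :: rest).length = rest.length + 1 := rfl
        have hmodlt : k * F % T < T := Nat.mod_lt _ hT
        have hdm := Nat.div_add_mod (k * F) T
        have hsplit : (k + 1) * F / T = k * F / T + (k * F % T + F) / T := by
          have h2 : (k + 1) * F = T * (k * F / T) + (k * F % T + F) := by omega
          rw [h2, Nat.mul_add_div hT]
        have hQ : k * F / T + (k * F % T + F) / T ≤ (k + 1 + rest.length) * F / T := by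
          rw [← hsplit]
          exact Nat.div_le_div_right (Nat.mul_le_mul_right F (by omega))
        have hk1 : k + (v :: rest).length = k + 1 + rest.length := by rw [hlr]; omega
        rw [hk1]
        congr 2
        rw [List.append_assoc]
        congr 1
        have hlen2 : (k + 1 + rest.length) * F / T - k * F / T
            = (k * F % T + F) / T
              + ((k + 1 + rest.length) * F / T - ((k + 1) * F / T)) := by
          rw [hsplit]
          revert hQ
          generalize (k + 1 + rest.length) * F / T = A
          generalize k * F / T = B
          generalize (k * F % T + F) / T = C
          intro hQ
          omega
        rw [hlen2, ← List.range'_append, List.map_append, hsplit]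
        simp only [one_mul]
        have hfirst : List.map
              (fun j => (((num * 2 ^ F + v.toNat) % 2 ^ (F + T - 1)
                  / 2 ^ (k * F % T + F - (j + 1) * T) % 2 ^ T : Nat) : Int))
              (List.range ((k * F % T + F) / T))
            = List.map
              (fun i => ((num' / 2 ^ ((k + 1 + rest.length) * F - (i + 1) * T) % 2 ^ T : Nat) : Int))
              (List.range' (k * F / T) ((k * F % T + F) / T)) := by
          rw [List.range'_eq_map_range, List.map_map]
          refine List.map_congr_left (fun j hj => ?_)
          have hjd : j < (k * F % T + F) / T := List.mem_range.mp hj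
          have hj1 : (j + 1) * T ≤ k * F % T + F := by
            calc (j + 1) * T ≤ ((k * F % T + F) / T) * T :=
                  Nat.mul_le_mul_right T (by omega)
              _ ≤ k * F % T + F := Nat.div_mul_le_self _ T
          have hTle : T ≤ (j + 1) * T := Nat.le_mul_of_pos_left T (by omega)
          have hdecomp := natNum_decomp F rest _ _ hnn
          simp only [Function.comp_apply]
          have hexp : (k + 1 + rest.length) * F - (k * F / T + j + 1) * T
              = rest.length * F + (k * F % T + F - (j + 1) * T) := by
            have e1 : (k + 1 + rest.length) * F = k * F + F + rest.length * F := by ring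
            have e2 : (k * F / T + j + 1) * T = T * (k * F / T) + (j + 1) * T := by ring
            omega
          rw [hexp]
          congr 1
          rw [mod_div_mod _ _ _ (F + T - 1) (by omega)]
          rw [pow_add, ← Nat.div_div_eq_div_mul, hdecomp]
        rw [hfirst]

theorem loopA_start (F T : Nat) (hT : 0 < T) (data : List Int) :
    convertLoop (F : Int) (T : Int) ((2 ^ (F + T - 1) - 1 : Nat) : Int) ((2 ^ T - 1 : Nat) : Int)
      data 0 0 []
    = (natNum F data 0).map (fun num' =>
        (((num' % 2 ^ (F + T - 1) : Nat) : Int), ((data.length * F % T : Nat) : Int),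
         (List.range' 0 (data.length * F / T)).map
           (fun i => ((num' / 2 ^ (data.length * F - (i + 1) * T) % 2 ^ T : Nat) : Int)))) := by
  have h := loopA_eq F T hT data 0 0 []
  simpa using h

-- ===== VERDICT (by name: the statement is the Claim_ definition above) =====
theorem Convert_spec : Claim_equal_Convert := by
  unfold Claim_equal_Convert
  intro data F T pad _hdom hpre
  obtain ⟨hF, hT⟩ := hpre
  unfold Spec_Convert
  lift F to Nat using hF with Fn
  lift T to Nat using (by omega : (0 : Int) ≤ T) with Tn
  have hTn : 0 < Tn := by exact_mod_cast hT
  have h2T : (1 : Nat) ≤ 2 ^ Tn := Nat.one_le_two_pow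
  have h2M : (1 : Nat) ≤ 2 ^ (Fn + Tn - 1) := Nat.one_le_two_pow
  simp only [Convert, Convert_alt]
  have hmo : pyShl 1 ((Tn : Nat) : Int) - 1 = ((2 ^ Tn - 1 : Nat) : Int) := by
    rw [pyShl, Int.shiftLeft_eq, Int.toNat_natCast, Nat.cast_sub h2T]
    push_cast
    ring
  have hFT : (((Fn : Nat) : Int) + ((Tn : Nat) : Int) - 1).toNat = Fn + Tn - 1 := by omega
  have hma : pyShl 1 (((Fn : Nat) : Int) + ((Tn : Nat) : Int) - 1) - 1
      = ((2 ^ (Fn + Tn - 1) - 1 : Nat) : Int) := by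
    rw [pyShl, Int.shiftLeft_eq, hFT, Nat.cast_sub h2M]
    push_cast
    ring
  rw [hmo, hma, loopA_start Fn Tn hTn data]
  have hfold : altFold ((Fn : Nat) : Int) data 0 = (natNum Fn data 0).map (fun (n : Nat) => (n : Int)) := by
    exact_mod_cast altFold_eq Fn data 0
  rw [hfold]
  cases hnn : natNum Fn data 0 with
  | none => simp
  | some num' =>
    simp only [Option.map_some]
    have htot : (data.length : Int) * ((Fn : Nat) : Int) = ((data.length * Fn : Nat) : Int) := by
      push_cast; ring
    rw [htot, PySem.Int.floordiv_natCast, PySem.Int.mod_natCast]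
    simp only [Int.toNat_natCast]
    have hlist : (List.range (data.length * Fn / Tn)).map
          (fun (i : Nat) => PySem.Int.band
            (pyShr ((num' : Nat) : Int) (((data.length * Fn : Nat) : Int) - ((i : Int) + 1) * ((Tn : Nat) : Int)))
            ((2 ^ Tn - 1 : Nat) : Int))
        = (List.range' 0 (data.length * Fn / Tn)).map
          (fun i => ((num' / 2 ^ (data.length * Fn - (i + 1) * Tn) % 2 ^ Tn : Nat) : Int)) := by
      rw [← List.range_eq_range']
      refine List.map_congr_left (fun i hi => ?_)
      have hi' : i < data.length * Fn / Tn := List.mem_range.mp hi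
      have hle : (i + 1) * Tn ≤ data.length * Fn := by
        calc (i + 1) * Tn ≤ (data.length * Fn / Tn) * Tn := Nat.mul_le_mul_right Tn (by omega)
          _ ≤ data.length * Fn := Nat.div_mul_le_self _ Tn
      have hsh : ((data.length * Fn : Nat) : Int) - ((i : Int) + 1) * ((Tn : Nat) : Int)
          = ((data.length * Fn - (i + 1) * Tn : Nat) : Int) := by
        rw [Nat.cast_sub hle]
        push_cast
        ring
      rw [hsh, pyShr_natCast, PySem.Int.band_natCast, Nat.and_two_pow_sub_one_eq_mod]
    rw [hlist]
    have hrm : data.length * Fn % Tn < Tn := Nat.mod_lt _ hTn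
    have hsub : (((Tn : Nat) : Int)) - ((data.length * Fn % Tn : Nat) : Int)
        = ((Tn - data.length * Fn % Tn : Nat) : Int) := by omega
    have hres : PySem.Int.band
          (pyShl ((num' : Nat) : Int) (((Tn : Nat) : Int) - ((data.length * Fn % Tn : Nat) : Int)))
          ((2 ^ Tn - 1 : Nat) : Int)
        = PySem.Int.band
          (pyShl ((num' % 2 ^ (Fn + Tn - 1) : Nat) : Int)
            (((Tn : Nat) : Int) - ((data.length * Fn % Tn : Nat) : Int)))
          ((2 ^ Tn - 1 : Nat) : Int) := by
      rw [hsub, pyShl_natCast, pyShl_natCast, PySem.Int.band_natCast, PySem.Int.band_natCast,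
        Nat.and_two_pow_sub_one_eq_mod, Nat.and_two_pow_sub_one_eq_mod]
      congr 1
      exact (residual_eq num' (data.length * Fn % Tn) Tn (Fn + Tn - 1) (by omega) (by omega)).symm
    rw [hres]
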